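-- pv_equiv track=rewrite | github.com/shraavb/catalan-stt | src/evaluation/metrics.py | detect_slang
-- ===== SOURCE A (Python) =====
-- from typing import List, Dict, Optional
--
-- def detect_slang(
--     text: str,
--     slang_dict: Dict[str, Dict],
--     region: Optional[str] = None
-- ) -> List[str]:
--     """Detect slang terms in text.
--
--     Args:
--         text: Text to analyze
--         slang_dict: Dictionary mapping regions to slang terms
--         region: Optional region to limit search to
--
--     Returns:
--         List of detected slang terms
--     """
--     text_lower = text.lower()
--     detected = []
--
--     if region:
--         regions_to_check = [region.lower()]
--     else:
--         regions_to_check = list(slang_dict.keys())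
--
--     for r in regions_to_check:
--         if r in slang_dict:
--             for term in slang_dict[r]:
--                 if term.lower() in text_lower:
--                     detected.append(term.lower())
--
--     return detected
-- ===== SOURCE B (Python) =====
-- def detect_slang(text, slang_dict, region=None):
--     """Sliding-window detection: for each distinct candidate-term length, slide a
--     window of that length over the text once and look each window up in a set of
--     candidate terms; finally emit candidates found, in the original order."""
--     text_lower = text.lower()
--     if region:
--         regions = [region.lower()]
--     else:
--         regions = list(slang_dict.keys())
--     candidates = [t.lower() for r in regions if r in slang_dict for t in slang_dict[r]]
--     distinct = set(candidates)
--     lengths = set(len(t) for t in candidates)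
--     found = set()
--     n = len(text_lower)
--     for length in lengths:
--         for i in range(n - length + 1):
--             w = text_lower[i:i + length]
--             if w in distinct:
--                 found.add(w)
--     return [t for t in candidates if t in found]
-- ===== Notes on version B (the rewrite author's own statement) =====
-- stated objective: alternative
-- what changed: A runs one substring search over the whole text per term per region; B collects the candidate terms once into a set, then for each distinct term length slides a window of that length over the text once, looking each window up in the set, and finally emits the found candidates in A's order.
import Mathlib
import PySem

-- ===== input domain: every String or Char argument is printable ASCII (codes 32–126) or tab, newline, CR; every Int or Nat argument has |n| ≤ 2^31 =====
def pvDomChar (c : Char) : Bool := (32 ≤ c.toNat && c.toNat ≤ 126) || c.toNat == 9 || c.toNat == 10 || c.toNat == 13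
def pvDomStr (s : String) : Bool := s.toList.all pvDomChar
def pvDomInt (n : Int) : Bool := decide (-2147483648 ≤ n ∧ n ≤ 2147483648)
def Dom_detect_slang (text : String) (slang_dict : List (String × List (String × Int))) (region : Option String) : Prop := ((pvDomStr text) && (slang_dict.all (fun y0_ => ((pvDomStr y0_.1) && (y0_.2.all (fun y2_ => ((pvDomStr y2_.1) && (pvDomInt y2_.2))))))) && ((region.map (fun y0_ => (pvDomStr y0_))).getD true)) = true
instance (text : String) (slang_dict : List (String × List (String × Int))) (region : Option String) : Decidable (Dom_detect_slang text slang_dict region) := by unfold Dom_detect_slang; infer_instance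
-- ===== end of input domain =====

-- ===== PORT A =====
-- One honest line: B replaces A's per-term substring searches by one sliding-window pass per
-- distinct term length, looking windows up in a set of candidate terms (objective: alternative algorithm, same cost).
def detect_slang (text : String) (slang_dict : List (String × List (String × Int))) (region : Option String) : List String :=
  let d := PySem.Dict.ofList slang_dict
  let text_lower := PySem.Str.lower text
  let regions_to_check : List String :=
    match region with
    | some r => if r = "" then d.keys else [PySem.Str.lower r]   -- `if region:` is false for None and ""
    | none => d.keys
  regions_to_check.foldl (fun detected r =>
    if d.contains r then
      ((PySem.Dict.ofList (d.getD r [])).keys).foldl (fun detected term =>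
        if PySem.Str.isIn (PySem.Str.lower term) text_lower then detected ++ [PySem.Str.lower term]
        else detected) detected
    else detected) []

-- ===== PORT B =====
-- helpers = the two loops of B's sweep:
-- pvWinStep: body of `for i in range(n - length + 1)`: look window text_lower[i:i+length] up, add it if it is a candidate
-- pvLenStep: body of `for length in lengths`
def pvWinStep (text_lower : String) (distinct : PySem.Set String) (length : Int)
    (found : PySem.Set String) (i : Int) : PySem.Set String :=
  let w := PySem.Str.slice text_lower (some i) (some (i + length))
  if PySem.Set.contains distinct w then PySem.Set.add found w else found

def pvLenStep (text_lower : String) (distinct : PySem.Set String)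
    (found : PySem.Set String) (length : Int) : PySem.Set String :=
  (PySem.List.pyRange 0 (PySem.Str.len text_lower - length + 1) 1).foldl
    (pvWinStep text_lower distinct length) found

def detect_slang_alt (text : String) (slang_dict : List (String × List (String × Int))) (region : Option String) : List String :=
  let d := PySem.Dict.ofList slang_dict
  let text_lower := PySem.Str.lower text
  let regions : List String :=
    match region with
    | some r => if r = "" then d.keys else [PySem.Str.lower r]   -- `if region:` is false for None and ""
    | none => d.keys
  let candidates : List String :=
    regions.flatMap (fun r =>
      if d.contains r then ((PySem.Dict.ofList (d.getD r [])).keys).map PySem.Str.lower else [])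
  let distinct : PySem.Set String := PySem.Set.ofList candidates
  let lengths : PySem.Set Int := PySem.Set.ofList (candidates.map (fun t => PySem.Str.len t))
  let found := lengths.foldl (pvLenStep text_lower distinct) PySem.Set.empty
  candidates.filter (fun t => PySem.Set.contains found t)

-- ===== PRECONDITION & SPEC =====
def Spec_detect_slang (text : String) (slang_dict : List (String × List (String × Int))) (region : Option String) (out : List String) : Prop := out = detect_slang_alt text slang_dict region
instance (text : String) (slang_dict : List (String × List (String × Int))) (region : Option String) (out : List String) : Decidable (Spec_detect_slang text slang_dict region out) := by unfold Spec_detect_slang; infer_instance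

-- ===== CLAIM (what is proved, stated in full; the proofs are below) =====
def Claim_equal_detect_slang : Prop := ∀ (text : String) (slang_dict : List (String × List (String × Int))) (region : Option String), Dom_detect_slang text slang_dict region → Spec_detect_slang text slang_dict region (detect_slang text slang_dict region)

-- ===== LEMMAS AND PROOFS =====

theorem pvWin_mem (tl : String) (distinct : PySem.Set String) (ℓ : Int) (is : List Int)
    (S : PySem.Set String) (t : String) :
    t ∈ is.foldl (pvWinStep tl distinct ℓ) S ↔
      t ∈ S ∨ (t ∈ distinct ∧ ∃ i ∈ is, PySem.Str.slice tl (some i) (some (i + ℓ)) = t) := by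
  induction is generalizing S with
  | nil => simp
  | cons i is ih =>
    rw [List.foldl_cons, ih]
    by_cases hc : PySem.Set.contains distinct (PySem.Str.slice tl (some i) (some (i + ℓ))) = true
    · simp only [pvWinStep, hc, if_true, PySem.Set.mem_add, List.mem_cons]
      constructor
      · rintro ((h | rfl) | ⟨hd, j, hj, hs⟩)
        · exact Or.inl h
        · exact Or.inr ⟨(PySem.Set.contains_iff _ _).mp hc, i, Or.inl rfl, rfl⟩
        · exact Or.inr ⟨hd, j, Or.inr hj, hs⟩
      · rintro (h | ⟨hd, j, (rfl | hj), hs⟩)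
        · exact Or.inl (Or.inl h)
        · exact Or.inl (Or.inr hs.symm)
        · exact Or.inr ⟨hd, j, hj, hs⟩
    · simp only [pvWinStep, hc, List.mem_cons]
      constructor
      · rintro (h | ⟨hd, j, hj, hs⟩)
        · exact Or.inl h
        · exact Or.inr ⟨hd, j, Or.inr hj, hs⟩
      · rintro (h | ⟨hd, j, (rfl | hj), hs⟩)
        · exact Or.inl h
        · exact absurd (hs ▸ (PySem.Set.contains_iff distinct t).mpr hd) hc
        · exact Or.inr ⟨hd, j, hj, hs⟩

theorem pvLen_mem (tl : String) (distinct : PySem.Set String) (ls : List Int)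
    (S : PySem.Set String) (t : String) :
    t ∈ ls.foldl (pvLenStep tl distinct) S ↔
      t ∈ S ∨ (t ∈ distinct ∧ ∃ ℓ ∈ ls, ∃ i ∈ PySem.List.pyRange 0 (PySem.Str.len tl - ℓ + 1) 1,
        PySem.Str.slice tl (some i) (some (i + ℓ)) = t) := by
  induction ls generalizing S with
  | nil => simp
  | cons ℓ ls ih =>
    rw [List.foldl_cons, ih]
    unfold pvLenStep
    rw [pvWin_mem]
    constructor
    · rintro ((h | ⟨hd, j, hj, hs⟩) | ⟨hd, ℓ', hℓ', j, hj, hs⟩)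
      · exact Or.inl h
      · exact Or.inr ⟨hd, ℓ, List.mem_cons_self, j, hj, hs⟩
      · exact Or.inr ⟨hd, ℓ', List.mem_cons_of_mem _ hℓ', j, hj, hs⟩
    · rintro (h | ⟨hd, ℓ', hℓ', j, hj, hs⟩)
      · exact Or.inl (Or.inl h)
      · rcases List.mem_cons.mp hℓ' with rfl | hℓ'
        · exact Or.inl (Or.inr ⟨hd, j, hj, hs⟩)
        · exact Or.inr ⟨hd, ℓ', hℓ', j, hj, hs⟩

theorem pvFound_iff (text_lower : String) (candidates : List String) (t : String)
    (ht : t ∈ candidates) :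
    t ∈ ((PySem.Set.ofList (candidates.map (fun u => PySem.Str.len u))).foldl
          (pvLenStep text_lower (PySem.Set.ofList candidates)) PySem.Set.empty) ↔
      PySem.Str.isIn t text_lower = true := by
  rw [pvLen_mem]
  simp only [PySem.Set.empty, List.not_mem_nil, false_or, PySem.Set.mem_ofList, List.mem_map,
    PySem.List.mem_pyRange_one, ht, true_and]
  rw [PySem.Str.isIn_eq, ← PySem.Chars.exists_prefix_drop_iff_isIn]
  constructor
  · rintro ⟨ℓ, ⟨u, hu, rfl⟩, i, ⟨hi0, hilt⟩, hs⟩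
    rw [PySem.Str.len_eq] at hs
    lift i to ℕ using hi0
    refine ⟨i, ?_⟩
    have hcast : (i : Int) + (u.toList.length : Int) = ((i + u.toList.length : ℕ) : Int) := by
      push_cast; ring
    rw [hcast] at hs
    have hteq : t.toList = (text_lower.toList.drop i).take (i + u.toList.length - i) := by
      rw [← hs, PySem.Str.toList_slice, PySem.Chars.slice_eq_listSlice, PySem.List.slice_natCast]
    rw [hteq]
    exact List.take_prefix _ _
  · rintro ⟨j, hj⟩
    by_cases hnil : t.toList = []
    · refine ⟨0, ⟨t, ht, by simp [PySem.Str.len_eq, hnil]⟩, 0, ⟨le_refl _, ?_⟩, ?_⟩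
      · have : 0 ≤ PySem.Str.len text_lower := by rw [PySem.Str.len_eq]; positivity
        omega
      · apply String.toList_inj.mp
        rw [PySem.Str.toList_slice, PySem.Chars.slice_eq_listSlice, hnil, add_zero]
        have h0 : ((0:Nat) : Int) = (0:Int) := rfl
        rw [← h0, PySem.List.slice_natCast]
        simp
    · have hjN : j ≤ text_lower.toList.length := by
        by_contra h
        have : text_lower.toList.drop j = [] := List.drop_eq_nil_of_le (by omega)
        rw [this] at hj
        exact hnil (List.prefix_nil.mp hj)
      have hlen : t.toList.length ≤ text_lower.toList.length - j := by
        have := hj.length_le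
        simpa using this
      refine ⟨PySem.Str.len t, ⟨t, ht, rfl⟩, (j : Int), ⟨by positivity, ?_⟩, ?_⟩
      · rw [PySem.Str.len_eq, PySem.Str.len_eq]
        omega
      · apply String.toList_inj.mp
        rw [PySem.Str.toList_slice, PySem.Chars.slice_eq_listSlice, PySem.Str.len_eq]
        have hcast : (j : Int) + (t.toList.length : Int) = ((j + t.toList.length : ℕ) : Int) := by
          push_cast; ring
        rw [hcast, PySem.List.slice_natCast]
        have harith : j + t.toList.length - j = t.toList.length := by omega
        rw [harith]
        exact (List.prefix_iff_eq_take.mp hj).symm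

-- B's whole body equals the one-predicate filter
theorem pvB_eq_filter (text_lower : String) (candidates : List String) :
    candidates.filter (fun t => PySem.Set.contains
      ((PySem.Set.ofList (candidates.map (fun u => PySem.Str.len u))).foldl
        (pvLenStep text_lower (PySem.Set.ofList candidates)) PySem.Set.empty) t)
      = candidates.filter (fun t => PySem.Str.isIn t text_lower) := by
  apply List.filter_congr
  intro t ht
  rw [Bool.eq_iff_iff, PySem.Set.contains_iff, pvFound_iff text_lower candidates t ht]

-- A's nested foldl equals the same filter over B's candidate list
theorem pvA_eq_filter (text_lower : String) (d : PySem.Dict String (List (String × Int)))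
    (regions : List String) :
    regions.foldl (fun detected r =>
      if d.contains r then
        ((PySem.Dict.ofList (d.getD r [])).keys).foldl (fun detected term =>
          if PySem.Str.isIn (PySem.Str.lower term) text_lower then detected ++ [PySem.Str.lower term]
          else detected) detected
      else detected) []
    = (regions.flatMap (fun r =>
        if d.contains r then ((PySem.Dict.ofList (d.getD r [])).keys).map PySem.Str.lower else [])).filter
        (fun t => PySem.Str.isIn t text_lower) := by
  have hstep : (fun (detected : List String) (r : String) =>
      if d.contains r then
        ((PySem.Dict.ofList (d.getD r [])).keys).foldl (fun detected term =>
          if PySem.Str.isIn (PySem.Str.lower term) text_lower then detected ++ [PySem.Str.lower term]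
          else detected) detected
      else detected)
      = fun (detected : List String) (r : String) => detected ++
          (if d.contains r then
            (((PySem.Dict.ofList (d.getD r [])).keys).filter
              (fun term => PySem.Str.isIn (PySem.Str.lower term) text_lower)).map PySem.Str.lower
          else []) := by
    funext detected r
    by_cases hc : d.contains r
    · simp only [hc, if_true, PySem.List.foldl_append_if]
    · simp [hc]
  rw [hstep, PySem.List.foldl_append_eq_flatMap, List.nil_append, List.filter_flatMap]
  congr 1; funext r
  by_cases hc : d.contains r <;> simp [hc, List.filter_map, Function.comp_def, PySem.Str.toList_lower]

-- ===== VERDICT (by name: the statement is the Claim_ definition above) =====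
theorem detect_slang_spec : Claim_equal_detect_slang := by
  intro text slang_dict region _
  unfold Spec_detect_slang detect_slang detect_slang_alt
  rw [pvB_eq_filter, pvA_eq_filter]
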